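-- pv_equiv track=rewrite | github.com/elamb785/Expense_Tracker_Project | expense_tracker.py | set_inter_months
-- ===== SOURCE A (Python) =====
-- def set_inter_months(x, y):
--     '''Set bill of omitted intermediate months to be 0 when plotted.'''
--     flag = 0
--     first_month = min(x)
--     last_month = max(x)
--     for i in range(first_month, last_month + 1):
--         if i not in x:
--             x.insert(-1, i)
--             y.insert(-1, 0)
--             flag = 1
--     return x, y, flag
-- ===== SOURCE B (Python) =====
-- def set_inter_months(x, y):
--     '''Set bill of omitted intermediate months to be 0 when plotted.'''
--     prev = min(x)
--     missing = []
--     for m in sorted(set(x)):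
--         missing.extend(range(prev + 1, m))
--         prev = m
--     x[-1:-1] = missing
--     y[-1:-1] = [0] * len(missing)
--     return x, y, (1 if missing else 0)
-- ===== Notes on version B (the rewrite author's own statement) =====
-- stated objective: faster
-- what changed: A scans every integer in [min(x),max(x)] testing membership in x and splices each missing month one list.insert(-1,...) at a time; B sorts the distinct months once, collects the gaps between consecutive sorted values in one pass, and splices them all in with a single slice assignment.
import Mathlib
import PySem

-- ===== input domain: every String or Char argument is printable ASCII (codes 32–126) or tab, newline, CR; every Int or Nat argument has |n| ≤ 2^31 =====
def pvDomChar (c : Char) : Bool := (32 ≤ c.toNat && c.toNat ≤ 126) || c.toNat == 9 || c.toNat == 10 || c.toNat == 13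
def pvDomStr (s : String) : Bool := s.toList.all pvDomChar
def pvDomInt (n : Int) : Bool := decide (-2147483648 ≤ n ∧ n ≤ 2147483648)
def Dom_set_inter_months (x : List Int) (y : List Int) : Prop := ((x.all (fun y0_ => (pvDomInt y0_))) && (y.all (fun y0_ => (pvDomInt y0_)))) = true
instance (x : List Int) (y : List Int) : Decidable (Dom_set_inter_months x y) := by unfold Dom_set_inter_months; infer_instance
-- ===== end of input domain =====

-- B replaces A's membership scan over the whole [min,max] range by a sort-of-the-distinct-months
-- gap scan and a single splice; equivalence is about contents (both Pythons also mutate x and y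
-- in place, in the same way).

-- ===== PORT A =====
-- for i in range(first_month, last_month+1): if i not in x: x.insert(-1,i); y.insert(-1,0); flag=1
def set_inter_months (x : List Int) (y : List Int) : List Int × List Int × Int :=
  match PySem.List.min? x (fun v => v), PySem.List.max? x (fun v => v) with
  | some first_month, some last_month =>
      (PySem.List.pyRange first_month (last_month + 1) 1).foldl
        (fun s i =>
          if s.1.contains i then s
          else (PySem.List.insert s.1 (-1) i, PySem.List.insert s.2.1 (-1) 0, 1))
        (x, y, 0)
  | _, _ => (x, y, 0)   -- min()/max() of an empty list raise ValueError: excluded by Pre_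

-- ===== PORT B =====
def set_inter_months_alt (x : List Int) (y : List Int) : List Int × List Int × Int :=
  match PySem.List.min? x (fun v => v) with
  | none => (x, y, 0)   -- min() of an empty list raises ValueError: excluded by Pre_
  | some p0 =>
      let present := PySem.List.sorted (PySem.Set.ofList x) (fun v => v)
      let missing :=
        (present.foldl (fun s m => (s.1 ++ PySem.List.pyRange (s.2 + 1) m 1, m))
          (([] : List Int), p0)).1
      -- x[-1:-1] = missing  (hand port of the slice assignment; exact since x ≠ [] under Pre_)
      let x' := x.take (x.length - 1) ++ missing ++ x.drop (x.length - 1)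
      -- y[-1:-1] = [0]*len(missing)  (for empty y Python clamps -1 to 0; so does Nat subtraction)
      let y' := y.take (y.length - 1) ++ List.replicate missing.length 0 ++ y.drop (y.length - 1)
      (x', y', if missing.isEmpty then 0 else 1)

-- ===== PRECONDITION & SPEC =====
-- A raises ValueError (min of empty sequence) iff x = []; nothing else raises.
def Pre_set_inter_months (x : List Int) (y : List Int) : Prop := x ≠ []
instance (x : List Int) (y : List Int) : Decidable (Pre_set_inter_months x y) := by unfold Pre_set_inter_months; infer_instance
def pvWitness_set_inter_months : List Int × List Int := ([1, 4, 3], [10, 20, 30])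

def Spec_set_inter_months (x : List Int) (y : List Int) (out : List Int × List Int × Int) : Prop := out = set_inter_months_alt x y
instance (x : List Int) (y : List Int) (out : List Int × List Int × Int) : Decidable (Spec_set_inter_months x y out) := by unfold Spec_set_inter_months; infer_instance

-- ===== CLAIM (what is proved, stated in full; the proofs are below) =====
def Claim_equal_set_inter_months : Prop := ∀ (x : List Int) (y : List Int), Dom_set_inter_months x y → Pre_set_inter_months x y → Spec_set_inter_months x y (set_inter_months x y)

-- ===== LEMMAS AND PROOFS =====

-- Python's list.insert(-1, v) on a nonempty list puts v just before the last element.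
theorem pv_insert_neg_one (u : List Int) (w v : Int) :
    PySem.List.insert (u ++ [w]) (-1) v = u ++ [v, w] := by
  simp [PySem.List.insert, PySem.List.sliceIndices]

-- the shape of the y list during A's loop: n zeros spliced before the last element
def pvY (y : List Int) (n : Nat) : List Int :=
  y.take (y.length - 1) ++ List.replicate n 0 ++ y.drop (y.length - 1)

theorem pvY_insert (y : List Int) (n : Nat) :
    PySem.List.insert (pvY y n) (-1) 0 = pvY y (n + 1) := by
  rcases List.eq_nil_or_concat y with rfl | ⟨yp, yl, hy⟩
  · cases n with
    | zero => simp [pvY, PySem.List.insert, PySem.List.sliceIndices]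
    | succ k =>
        have h : (pvY [] (k + 1)) = List.replicate k (0:Int) ++ [0] := by
          simp [pvY, List.replicate_succ']
        rw [h, pv_insert_neg_one]
        simp [pvY, List.replicate_succ', List.append_assoc]
  · subst hy
    simp only [List.concat_eq_append]
    have h : pvY (yp ++ [yl]) n = (yp ++ List.replicate n 0) ++ [yl] := by
      simp [pvY]
    rw [h, pv_insert_neg_one]
    simp [pvY, List.replicate_succ', List.append_assoc]

def pvFlag (M : List Int) : Int := if M.isEmpty then 0 else 1

-- invariant of A's loop: state = (xp ++ M ++ [xl], pvY y |M|, pvFlag M), M the missing months so far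
theorem pvA_loop (xp : List Int) (xl : Int) (y : List Int) :
    ∀ (l M : List Int), l.Pairwise (· < ·) → (∀ i ∈ l, ∀ m ∈ M, m < i) →
    l.foldl
      (fun s i =>
        if s.1.contains i then s
        else (PySem.List.insert s.1 (-1) i, PySem.List.insert s.2.1 (-1) 0, 1))
      (xp ++ M ++ [xl], pvY y M.length, pvFlag M)
    = (xp ++ (M ++ l.filter (fun i => !(xp ++ [xl]).contains i)) ++ [xl],
       pvY y (M ++ l.filter (fun i => !(xp ++ [xl]).contains i)).length,
       pvFlag (M ++ l.filter (fun i => !(xp ++ [xl]).contains i))) := by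
  intro l
  induction l with
  | nil => intro M _ _; simp
  | cons i l' ih =>
      intro M hl hM
      have hli : ∀ j ∈ l', i < j := by
        intro j hj; exact (List.pairwise_cons.mp hl).1 j hj
      have hl' : l'.Pairwise (· < ·) := (List.pairwise_cons.mp hl).2
      by_cases hix : i ∈ xp ++ [xl]
      · -- i already a month of x: loop body does nothing
        have hc : (xp ++ M ++ [xl]).contains i = true := by
          rcases List.mem_append.mp hix with h | h
          · simp [List.mem_append, h]
          · simp [List.mem_append, h]
        have hf : ¬ ((fun i => !(xp ++ [xl]).contains i) i = true) := by simp [hix]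
        rw [List.foldl_cons]
        simp only [hc, if_true]
        rw [ih M hl' (fun j hj m hm => hM j (List.mem_cons_of_mem _ hj) m hm)]
        rw [List.filter_cons_of_neg (p := fun i => !(xp ++ [xl]).contains i) hf]
      · -- i missing: inserted before the last element
        have hiM : i ∉ M := fun h => lt_irrefl i (hM i (List.mem_cons_self) i h)
        have hmem : i ∉ xp ++ M ++ [xl] := by
          intro h
          rcases List.mem_append.mp h with h | h
          · rcases List.mem_append.mp h with h | h
            · exact hix (List.mem_append.mpr (Or.inl h))
            · exact hiM h
          · exact hix (List.mem_append.mpr (Or.inr h))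
        have hc : (xp ++ M ++ [xl]).contains i = false := by
          rw [List.contains_eq_mem]; exact decide_eq_false hmem
        have hins : PySem.List.insert (xp ++ M ++ [xl]) (-1) i = xp ++ (M ++ [i]) ++ [xl] := by
          have := pv_insert_neg_one (xp ++ M) xl i
          simpa [List.append_assoc] using this
        rw [List.foldl_cons]
        simp only [hc, Bool.false_eq_true, if_false]
        rw [hins, pvY_insert]
        have hstate : (xp ++ (M ++ [i]) ++ [xl], pvY y (M ++ [i]).length, pvFlag (M ++ [i]))
            = (xp ++ (M ++ [i]) ++ [xl], pvY y (M.length + 1), (1 : Int)) := by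
          simp [pvFlag]
        rw [← hstate]
        rw [ih (M ++ [i]) hl'
            (by intro j hj m hm
                rcases List.mem_append.mp hm with h | h
                · exact hM j (List.mem_cons_of_mem _ hj) m h
                · rw [List.mem_singleton.mp h]; exact hli j hj)]
        have hf : (fun i => !(xp ++ [xl]).contains i) i = true := by simp [hix]
        rw [List.filter_cons_of_pos (p := fun i => !(xp ++ [xl]).contains i) hf]
        simp [List.append_assoc]

-- B's gap scan: for a strictly increasing chain p :: s, the collected ranges are exactly the
-- integers strictly between p and the last element that are not in the chain
theorem pvB_gaps :
    ∀ (s : List Int) (p : Int) (acc : List Int), (p :: s).Pairwise (· < ·) →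
    (s.foldl (fun t m => (t.1 ++ PySem.List.pyRange (t.2 + 1) m 1, m)) (acc, p)).1
    = acc ++ (PySem.List.pyRange (p + 1) (s.getLastD p + 1) 1).filter
        (fun i => !(p :: s).contains i) := by
  intro s
  induction s with
  | nil => intro p acc _; simp [PySem.List.pyRange_one_eq_nil (by omega : p + 1 ≤ p + 1)]
  | cons m t ih =>
      intro p acc hp
      have hpm : p < m := (List.pairwise_cons.mp hp).1 m List.mem_cons_self
      have hmt : ∀ j ∈ t, m < j := by
        intro j hj
        exact (List.pairwise_cons.mp (List.pairwise_cons.mp hp).2).1 j hj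
      have hml : m ≤ t.getLastD m := by
        rcases List.eq_nil_or_concat t with h | ⟨tp, tl, h⟩
        · subst h; simp
        · subst h
          simp only [List.concat_eq_append] at hmt ⊢
          rw [List.getLastD_concat]
          exact le_of_lt (hmt tl (by simp))
      rw [List.foldl_cons]
      simp only []
      rw [ih m (acc ++ PySem.List.pyRange (p + 1) m 1) (List.pairwise_cons.mp hp).2]
      rw [List.getLastD_cons]
      rw [PySem.List.pyRange_one_append (p + 1) m (t.getLastD m + 1) (by omega) (by omega)]
      rw [List.filter_append]
      have hfirst : (PySem.List.pyRange (p + 1) m 1).filter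
          (fun i => !(p :: m :: t).contains i) = PySem.List.pyRange (p + 1) m 1 := by
        apply List.filter_eq_self.mpr
        intro i hi
        have hib := PySem.List.mem_pyRange_one.mp hi
        simp only [List.contains_eq_mem, Bool.not_eq_eq_eq_not, Bool.not_true]
        apply decide_eq_false
        intro h
        rcases List.mem_cons.mp h with h | h
        · omega
        rcases List.mem_cons.mp h with h | h
        · omega
        · have := hmt i h; omega
      have hsplit : PySem.List.pyRange m (t.getLastD m + 1) 1
          = m :: PySem.List.pyRange (m + 1) (t.getLastD m + 1) 1 :=
        PySem.List.pyRange_one_cons (by omega)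
      have hsecond : (PySem.List.pyRange m (t.getLastD m + 1) 1).filter
          (fun i => !(p :: m :: t).contains i)
          = (PySem.List.pyRange (m + 1) (t.getLastD m + 1) 1).filter
              (fun i => !(m :: t).contains i) := by
        have hm0 : ¬ ((fun i => !(p :: m :: t).contains i) m = true) := by
          simp [List.contains_eq_mem]
        rw [hsplit, List.filter_cons_of_neg (p := fun i => !(p :: m :: t).contains i) hm0]
        apply List.filter_congr
        intro i hi
        have hib := PySem.List.mem_pyRange_one.mp hi
        simp only [List.contains_eq_mem, List.mem_cons, Bool.not_eq_eq_eq_not]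
        have : ¬ i = p := by omega
        simp [this]
      rw [hfirst, hsecond]
      simp [List.append_assoc]

-- every member of a strictly increasing list is at most its last element
theorem pv_mem_le_getLastD (l : List Int) (hl : l.Pairwise (· < ·)) (d : Int) :
    ∀ z ∈ l, z ≤ l.getLastD d := by
  induction l generalizing d with
  | nil => intro z hz; cases hz
  | cons a t ih =>
      intro z hz
      rw [List.getLastD_cons]
      rcases List.mem_cons.mp hz with rfl | hz'
      · rcases List.eq_nil_or_concat t with h | ⟨tp, tl, h⟩
        · subst h; simp
        · subst h
          simp only [List.concat_eq_append] at *
          rw [List.getLastD_concat]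
          exact le_of_lt ((List.pairwise_cons.mp hl).1 tl (by simp))
      · exact ih (List.pairwise_cons.mp hl).2 a z hz'

-- ===== VERDICT (by name: the statement is the Claim_ definition above) =====
theorem set_inter_months_spec : Claim_equal_set_inter_months := by
  intro x y _ hx
  unfold Spec_set_inter_months
  obtain ⟨xp, xl, hxc⟩ : ∃ xp xl, x = xp ++ [xl] := by
    rcases List.eq_nil_or_concat x with h | ⟨xp, xl, h⟩
    · exact absurd h hx
    · exact ⟨xp, xl, by rw [h, List.concat_eq_append]⟩
  have hxne : x ≠ [] := hx
  obtain ⟨a, ha⟩ : ∃ a, PySem.List.min? x (fun v => v) = some a := by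
    cases h : PySem.List.min? x (fun v => v) with
    | none => exact absurd ((PySem.List.min?_eq_none_iff x (fun v => v)).mp h) hxne
    | some a => exact ⟨a, rfl⟩
  obtain ⟨b, hb⟩ : ∃ b, PySem.List.max? x (fun v => v) = some b := by
    cases h : PySem.List.max? x (fun v => v) with
    | none => exact absurd ((PySem.List.max?_eq_none_iff x (fun v => v)).mp h) hxne
    | some b => exact ⟨b, rfl⟩
  have hamem : a ∈ x := PySem.List.min?_mem ha
  have hamin : ∀ z ∈ x, a ≤ z := PySem.List.min?_isMin ha
  have hbmem : b ∈ x := PySem.List.max?_mem hb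
  have hbmax : ∀ z ∈ x, z ≤ b := PySem.List.max?_isMax hb
  -- the sorted distinct months
  set present := PySem.List.sorted (PySem.Set.ofList x) (fun v => v) with hpres
  have hmemp : ∀ z, z ∈ present ↔ z ∈ x := by
    intro z
    rw [hpres, PySem.List.mem_sorted, PySem.Set.mem_ofList]
  have hppw : present.Pairwise (· < ·) := PySem.List.sorted_ofList_pairwise_lt x
  obtain ⟨m, t, hmt⟩ : ∃ m t, present = m :: t := by
    cases h : present with
    | nil =>
        have h2 := (hmemp a).mpr hamem
        rw [h] at h2
        cases h2
    | cons m t => exact ⟨m, t, rfl⟩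
  have hma : m = a := by
    have h1 : m ≤ a := PySem.List.key_head_sorted_le (PySem.Set.ofList x) (fun v => v)
        (by rw [← hpres]; exact hmt) a ((PySem.Set.mem_ofList x a).mpr hamem)
    have h2 : a ≤ m := hamin m ((hmemp m).mp (hmt ▸ List.mem_cons_self))
    omega
  have hlast : present.getLastD a = b := by
    have h1 : present.getLastD a ≤ b := by
      rcases List.eq_nil_or_concat present with h | ⟨pp, pl, h⟩
      · rw [h]; simpa using hamin b hbmem
      · rw [h, List.concat_eq_append, List.getLastD_concat]
        exact hbmax pl ((hmemp pl).mp (by rw [h]; simp))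
    have h2 : b ≤ present.getLastD a :=
      pv_mem_le_getLastD present hppw a b ((hmemp b).mpr hbmem)
    omega
  -- evaluate B
  unfold set_inter_months_alt
  rw [ha]
  simp only [← hpres]
  -- B's missing list
  have hBmiss :
      (present.foldl (fun s m => (s.1 ++ PySem.List.pyRange (s.2 + 1) m 1, m))
        (([] : List Int), a)).1
      = (PySem.List.pyRange (a + 1) (b + 1) 1).filter (fun i => !present.contains i) := by
    rw [hmt, List.foldl_cons, hma]
    have h0 : PySem.List.pyRange (a + 1) a 1 = [] :=
      PySem.List.pyRange_one_eq_nil (by omega)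
    rw [h0, List.append_nil]
    rw [pvB_gaps t a [] (by rw [← hma, ← hmt]; exact hppw)]
    have hgl : t.getLastD a = b := by
      rw [← hlast, hmt, List.getLastD_cons, hma]
    rw [hgl]
    simp only [List.nil_append]
  rw [hBmiss]
  -- A's missing list equals B's
  have hrange : PySem.List.pyRange a (b + 1) 1 = a :: PySem.List.pyRange (a + 1) (b + 1) 1 :=
    PySem.List.pyRange_one_cons (by have := hamin b hbmem; omega)
  have hfiltEq : (PySem.List.pyRange a (b + 1) 1).filter (fun i => !x.contains i)
      = (PySem.List.pyRange (a + 1) (b + 1) 1).filter (fun i => !present.contains i) := by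
    rw [hrange]
    have ha0 : ¬ ((fun i => !x.contains i) a = true) := by
      simp [List.contains_eq_mem, hamem]
    rw [List.filter_cons_of_neg (p := fun i => !x.contains i) ha0]
    apply List.filter_congr
    intro i _
    have hiff : (i ∈ x) ↔ (i ∈ present) := (hmemp i).symm
    simp only [List.contains_eq_mem]
    congr 1
    exact decide_eq_decide.mpr hiff
  -- evaluate A via the loop invariant
  unfold set_inter_months
  rw [ha, hb]
  simp only []
  have hstart : (x, y, (0:Int))
      = (xp ++ ([] : List Int) ++ [xl], pvY y ([] : List Int).length, pvFlag []) := by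
    simp [pvFlag, pvY, hxc]
  rw [hstart]
  rw [pvA_loop xp xl y (PySem.List.pyRange a (b + 1) 1) []
      (PySem.List.pairwise_lt_pyRange_one a (b + 1)) (by intro i _ m hm; cases hm)]
  rw [List.nil_append, ← hxc, hfiltEq]
  -- final shapes
  have htake : x.take (x.length - 1) = xp := by rw [hxc]; simp
  have hdrop : x.drop (x.length - 1) = [xl] := by rw [hxc]; simp
  rw [htake, hdrop]
  refine Prod.ext ?_ (Prod.ext ?_ ?_)
  · simp
  · simp [pvY]
  · simp [pvFlag]
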